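-- pv_equiv track=rewrite | github.com/OnlyNandan/ehr-amr-prediction | backend/services/feature_engineering.py | get_feature_category
-- ===== SOURCE A (Python) =====
-- def get_feature_category(feature_name: str) -> str:
--     """Get the category of a feature based on its prefix"""
--     prefix_map = {
--         "img_": "image",
--         "vital_": "vitals",
--         "lab_": "labs",
--         "hist_": "history",
--         "demo_": "demographics",
--         "ctx_": "context",
--         "int_": "interaction"
--     }
--
--     for prefix, category in prefix_map.items():
--         if feature_name.startswith(prefix):
--             return category
--
--     return "unknown"
-- ===== SOURCE B (Python) =====
-- def get_feature_category(feature_name: str) -> str: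
--     """Get the category of a feature based on its prefix"""
--     prefix_map = {
--         "img_": "image",
--         "vital_": "vitals",
--         "lab_": "labs",
--         "hist_": "history",
--         "demo_": "demographics",
--         "ctx_": "context",
--         "int_": "interaction"
--     }
--     head, sep, _rest = feature_name.partition('_')
--     return prefix_map.get(head + sep, "unknown")
-- ===== Notes on version B (the rewrite author's own statement) =====
-- stated objective: alternative
-- what changed: Replaces A's ordered startswith scan over the prefix map by computing the candidate key once with str.partition at the first underscore and doing a single dict lookup with the same default category.
import Mathlib
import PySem

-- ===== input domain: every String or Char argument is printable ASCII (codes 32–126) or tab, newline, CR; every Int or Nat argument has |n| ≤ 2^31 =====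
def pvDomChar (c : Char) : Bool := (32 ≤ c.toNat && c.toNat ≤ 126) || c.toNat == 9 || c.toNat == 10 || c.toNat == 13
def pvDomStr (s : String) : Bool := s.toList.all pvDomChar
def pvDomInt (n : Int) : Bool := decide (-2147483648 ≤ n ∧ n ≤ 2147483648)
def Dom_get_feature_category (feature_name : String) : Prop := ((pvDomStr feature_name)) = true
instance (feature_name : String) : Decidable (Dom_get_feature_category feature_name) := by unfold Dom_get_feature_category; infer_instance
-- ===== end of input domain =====

-- B replaces A's linear startswith scan over the prefix map by computing the candidate key once
-- (str.partition('_')) and doing a single dict lookup; objective: alternative (same observable results).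

-- ===== PORT A =====
-- A iterates over prefix_map.items() in insertion order testing startswith; ported as the ordered chain.
def get_feature_category (feature_name : String) : String :=
  if PySem.Str.startswith feature_name "img_" then "image"
  else if PySem.Str.startswith feature_name "vital_" then "vitals"
  else if PySem.Str.startswith feature_name "lab_" then "labs"
  else if PySem.Str.startswith feature_name "hist_" then "history"
  else if PySem.Str.startswith feature_name "demo_" then "demographics"
  else if PySem.Str.startswith feature_name "ctx_" then "context"
  else if PySem.Str.startswith feature_name "int_" then "interaction"
  else "unknown"

-- ===== PORT B =====
def pvPrefixMap : PySem.Dict String String :=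
  PySem.Dict.ofList [("img_", "image"), ("vital_", "vitals"), ("lab_", "labs"),
    ("hist_", "history"), ("demo_", "demographics"), ("ctx_", "context"), ("int_", "interaction")]

-- str.partition('_') ported by hand (exact): head ++ sep, where head is the text before the first
-- '_' and sep is "_" if '_' occurs in the string, "" otherwise (Source B uses head + sep only).
def pvPartitionKey (l : List Char) : List Char :=
  l.takeWhile (· ≠ '_') ++ (if '_' ∈ l then ['_'] else [])

def get_feature_category_alt (feature_name : String) : String :=
  pvPrefixMap.getD (String.ofList (pvPartitionKey feature_name.toList)) "unknown"

-- ===== PRECONDITION & SPEC =====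
def Spec_get_feature_category (feature_name : String) (out : String) : Prop := out = get_feature_category_alt feature_name
instance (feature_name : String) (out : String) : Decidable (Spec_get_feature_category feature_name out) := by unfold Spec_get_feature_category; infer_instance

-- ===== CLAIM (what is proved, stated in full; the proofs are below) =====
def Claim_equal_get_feature_category : Prop := ∀ (feature_name : String), Dom_get_feature_category feature_name → Spec_get_feature_category feature_name (get_feature_category feature_name)

-- ===== LEMMAS AND PROOFS =====

lemma pv_takeWhile_append (cs u : List Char) (h : '_' ∉ cs) :
    (cs ++ '_' :: u).takeWhile (· ≠ '_') = cs := by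
  induction cs with
  | nil =>
    rw [List.nil_append, List.takeWhile_cons_of_neg (by simp)]
  | cons d cs' ih =>
    simp only [List.mem_cons, not_or] at h
    rw [List.cons_append, List.takeWhile_cons_of_pos (by simp; exact fun e => h.1 e.symm),
      ih h.2]

-- a string containing '_' splits as (text before the first '_') ++ '_' :: rest
lemma pv_split (l : List Char) (hm : '_' ∈ l) :
    l = l.takeWhile (· ≠ '_') ++ '_' :: (l.dropWhile (· ≠ '_')).tail := by
  induction l with
  | nil => cases hm
  | cons c t ih =>
    by_cases hc : c = '_'
    · subst hc
      rw [List.takeWhile_cons_of_neg (by simp), List.dropWhile_cons_of_neg (by simp)]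
      rfl
    · have hm' : '_' ∈ t := by
        rcases List.mem_cons.mp hm with h | h
        · exact absurd h.symm hc
        · exact h
      rw [List.takeWhile_cons_of_pos (by simp [hc]), List.dropWhile_cons_of_pos (by simp [hc]),
        List.cons_append]
      exact congrArg (c :: ·) (ih hm')

-- the computed key equals cs ++ "_" exactly when cs ++ "_" is a prefix of the string
lemma pv_key_of_prefix (l cs : List Char) (h : '_' ∉ cs) (hp : (cs ++ ['_']) <+: l) :
    pvPartitionKey l = cs ++ ['_'] := by
  rcases hp with ⟨u, hu⟩
  subst hu
  unfold pvPartitionKey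
  rw [List.append_assoc, List.singleton_append, pv_takeWhile_append cs u h, if_pos (by simp)]

lemma pv_prefix_of_key (l cs : List Char) (_h : '_' ∉ cs) (hk : pvPartitionKey l = cs ++ ['_']) :
    (cs ++ ['_']) <+: l := by
  by_cases hm : '_' ∈ l
  · simp only [pvPartitionKey, hm, if_pos] at hk
    have ht : l.takeWhile (· ≠ '_') = cs := List.append_cancel_right hk
    refine ⟨(l.dropWhile (· ≠ '_')).tail, ?_⟩
    have hs := pv_split l hm
    rw [ht] at hs
    rw [List.append_assoc, List.singleton_append]
    exact hs.symm
  · simp only [pvPartitionKey, hm, if_neg, not_false_iff, List.append_nil] at hk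
    exfalso
    have hm' : '_' ∈ l.takeWhile (· ≠ '_') := by rw [hk]; simp
    have := List.mem_takeWhile_imp hm'
    simp at this

-- if A's test for prefix p succeeds, B's computed key is exactly p
lemma pv_pos (s p : String) (cs : List Char) (hp : p.toList = cs ++ ['_']) (h : '_' ∉ cs)
    (hsw : PySem.Str.startswith s p = true) :
    String.ofList (pvPartitionKey s.toList) = p := by
  rw [PySem.Str.startswith_eq, PySem.Chars.startswith_iff, hp] at hsw
  rw [pv_key_of_prefix s.toList cs h hsw, ← hp, String.ofList_toList]

-- if A's test for prefix p fails, B's computed key differs from p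
lemma pv_neg (s p : String) (cs : List Char) (hp : p.toList = cs ++ ['_']) (h : '_' ∉ cs)
    (hsw : PySem.Str.startswith s p = false) :
    (p == String.ofList (pvPartitionKey s.toList)) = false := by
  rw [beq_eq_false_iff_ne]
  intro he
  have hk : pvPartitionKey s.toList = cs ++ ['_'] := by
    have := congrArg String.toList he
    rw [String.toList_ofList, hp] at this
    exact this.symm
  have hpre := pv_prefix_of_key s.toList cs h hk
  have hsw' : PySem.Chars.startswith s.toList p.toList = true := by
    rw [PySem.Chars.startswith_iff, hp]; exact hpre
  rw [PySem.Str.startswith_eq, hsw'] at hsw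
  cases hsw

lemma pv_map_items : pvPrefixMap = ⟨[("img_", "image"), ("vital_", "vitals"), ("lab_", "labs"),
    ("hist_", "history"), ("demo_", "demographics"), ("ctx_", "context"), ("int_", "interaction")]⟩ := by
  rfl

lemma pv_alt_of_key (s p cat : String) (hkey : String.ofList (pvPartitionKey s.toList) = p)
    (hget : pvPrefixMap.getD p "unknown" = cat) :
    get_feature_category_alt s = cat := by
  unfold get_feature_category_alt
  rw [hkey, hget]

-- ===== VERDICT (by name: the statement is the Claim_ definition above) =====
theorem get_feature_category_spec : Claim_equal_get_feature_category := by
  intro s _dom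
  unfold Spec_get_feature_category get_feature_category
  by_cases h1 : PySem.Str.startswith s "img_" = true
  · simp only [h1, if_true]
    exact (pv_alt_of_key s _ _ (pv_pos s "img_" ['i','m','g'] rfl (by decide) h1) (by decide)).symm
  by_cases h2 : PySem.Str.startswith s "vital_" = true
  · simp only [h1, h2, if_true]
    exact (pv_alt_of_key s _ _ (pv_pos s "vital_" ['v','i','t','a','l'] rfl (by decide) h2) (by decide)).symm
  by_cases h3 : PySem.Str.startswith s "lab_" = true
  · simp only [h1, h2, h3, if_true]
    exact (pv_alt_of_key s _ _ (pv_pos s "lab_" ['l','a','b'] rfl (by decide) h3) (by decide)).symm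
  by_cases h4 : PySem.Str.startswith s "hist_" = true
  · simp only [h1, h2, h3, h4, if_true]
    exact (pv_alt_of_key s _ _ (pv_pos s "hist_" ['h','i','s','t'] rfl (by decide) h4) (by decide)).symm
  by_cases h5 : PySem.Str.startswith s "demo_" = true
  · simp only [h1, h2, h3, h4, h5, if_true]
    exact (pv_alt_of_key s _ _ (pv_pos s "demo_" ['d','e','m','o'] rfl (by decide) h5) (by decide)).symm
  by_cases h6 : PySem.Str.startswith s "ctx_" = true
  · simp only [h1, h2, h3, h4, h5, h6, if_true]
    exact (pv_alt_of_key s _ _ (pv_pos s "ctx_" ['c','t','x'] rfl (by decide) h6) (by decide)).symm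
  by_cases h7 : PySem.Str.startswith s "int_" = true
  · simp only [h1, h2, h3, h4, h5, h6, h7, if_true]
    exact (pv_alt_of_key s _ _ (pv_pos s "int_" ['i','n','t'] rfl (by decide) h7) (by decide)).symm
  · simp only [h1, h2, h3, h4, h5, h6, h7]
    have e1 := pv_neg s "img_" ['i','m','g'] rfl (by decide) (by simpa using h1)
    have e2 := pv_neg s "vital_" ['v','i','t','a','l'] rfl (by decide) (by simpa using h2)
    have e3 := pv_neg s "lab_" ['l','a','b'] rfl (by decide) (by simpa using h3)
    have e4 := pv_neg s "hist_" ['h','i','s','t'] rfl (by decide) (by simpa using h4)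
    have e5 := pv_neg s "demo_" ['d','e','m','o'] rfl (by decide) (by simpa using h5)
    have e6 := pv_neg s "ctx_" ['c','t','x'] rfl (by decide) (by simpa using h6)
    have e7 := pv_neg s "int_" ['i','n','t'] rfl (by decide) (by simpa using h7)
    unfold get_feature_category_alt
    rw [pv_map_items]
    simp [PySem.Dict.getD, PySem.Dict.get?, List.find?, e1, e2, e3, e4, e5, e6, e7]
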